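-- pv_equiv track=rewrite | github.com/rafaelperazzo/programacao-web | moodledata/vpl_data/46/usersdata/122/19664/submittedfiles/funcoes1.py | igualdade
-- ===== SOURCE A (Python) =====
-- def igualdade (lista):
--     cont=0
--     for i in range(0, len(lista),1):
--         if i==0:
--             if lista[0]==lista[1]:
--                 cont=cont+1
--         elif i==(len(lista)-1):
--             if lista[len(lista)-1]==lista[len(lista)-2]:
--                 cont=cont+1
--     if cont>0:
--         return True
--     else:
--         return False
-- ===== SOURCE B (Python) =====
-- def igualdade(lista):
--     return len(lista) > 0 and (lista[0] == lista[1] or lista[-1] == lista[-2])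
-- ===== Notes on version B (the rewrite author's own statement) =====
-- stated objective: simpler
-- what changed: Replaces the counter loop over all indices with a single closed-form boolean expression on the first and last adjacent pairs (no loop, no counter).
import Mathlib
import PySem

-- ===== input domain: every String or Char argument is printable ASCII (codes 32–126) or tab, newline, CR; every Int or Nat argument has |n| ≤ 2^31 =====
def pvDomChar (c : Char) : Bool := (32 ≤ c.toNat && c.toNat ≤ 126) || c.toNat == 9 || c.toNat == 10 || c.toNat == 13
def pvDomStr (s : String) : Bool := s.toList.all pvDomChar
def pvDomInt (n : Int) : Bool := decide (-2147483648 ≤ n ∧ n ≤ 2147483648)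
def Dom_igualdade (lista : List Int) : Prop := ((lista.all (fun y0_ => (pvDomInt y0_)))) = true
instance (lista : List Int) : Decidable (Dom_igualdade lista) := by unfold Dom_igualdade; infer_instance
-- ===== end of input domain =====

-- B replaces A's counter loop over all indices by one closed-form boolean on the first and last adjacent pairs (simpler).


-- ===== PORT A =====
-- the loop body of A, parameterised by the list (pyGet? … |>.getD 0 is exact on Pre_,
-- where every index taken is in range)
def igualdadeStep (lista : List Int) (cont i : Int) : Int :=
  let n : Int := lista.length
  if i = 0 then
    if (PySem.List.pyGet? lista 0).getD 0 = (PySem.List.pyGet? lista 1).getD 0 then cont + 1 else cont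
  else if i = n - 1 then
    if (PySem.List.pyGet? lista (n - 1)).getD 0 = (PySem.List.pyGet? lista (n - 2)).getD 0 then cont + 1 else cont
  else cont

def igualdade (lista : List Int) : Bool :=
  let cont : Int := (PySem.List.pyRange 0 (lista.length : Int) 1).foldl (igualdadeStep lista) 0
  if cont > 0 then true else false

-- ===== PORT B =====
def igualdade_alt (lista : List Int) : Bool :=
  decide (0 < (lista.length : Int)) &&
    (decide ((PySem.List.pyGet? lista 0).getD 0 = (PySem.List.pyGet? lista 1).getD 0) ||
     decide ((PySem.List.pyGet? lista (-1)).getD 0 = (PySem.List.pyGet? lista (-2)).getD 0))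

-- ===== PRECONDITION & SPEC =====
-- A (and B) raise IndexError exactly on singleton lists (lista[1] with len == 1); excluded here.
def Pre_igualdade (lista : List Int) : Prop := lista.length ≠ 1
instance (lista : List Int) : Decidable (Pre_igualdade lista) := by unfold Pre_igualdade; infer_instance
def pvWitness_igualdade : List Int := [1, 1, 2]

def Spec_igualdade (lista : List Int) (out : Bool) : Prop := out = igualdade_alt lista
instance (lista : List Int) (out : Bool) : Decidable (Spec_igualdade lista out) := by unfold Spec_igualdade; infer_instance

-- ===== CLAIM (what is proved, stated in full; the proofs are below) =====
def Claim_equal_igualdade : Prop := ∀ (lista : List Int), Dom_igualdade lista → Pre_igualdade lista → Spec_igualdade lista (igualdade lista)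

-- ===== LEMMAS AND PROOFS =====

-- middle iterations (0 < i < n-1) leave the counter unchanged
theorem igualdadeStep_mid (lista : List Int) (cont i : Int) (h0 : 0 < i)
    (h1 : i < (lista.length : Int) - 1) : igualdadeStep lista cont i = cont := by
  unfold igualdadeStep
  simp only []
  rw [if_neg (by omega), if_neg (by omega)]

theorem foldl_igualdadeStep_mid (lista : List Int) (a b : Int) (ha : 0 < a)
    (hb : b ≤ (lista.length : Int) - 1) (cont : Int) :
    (PySem.List.pyRange a b 1).foldl (igualdadeStep lista) cont = cont := by
  rw [PySem.List.foldl_congr_mem (PySem.List.pyRange a b 1) (igualdadeStep lista)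
      (fun c _ => c) cont
      (by intro acc x hx
          rw [PySem.List.mem_pyRange_one] at hx
          exact igualdadeStep_mid lista acc x (by omega) (by omega))]
  simp

-- counter after the whole loop, for length ≥ 2
theorem igualdade_cont (lista : List Int) (h : 2 ≤ lista.length) :
    (PySem.List.pyRange 0 (lista.length : Int) 1).foldl (igualdadeStep lista) 0 =
      (if (PySem.List.pyGet? lista (lista.length - 1 : Int)).getD 0
          = (PySem.List.pyGet? lista (lista.length - 2 : Int)).getD 0 then
        (if (PySem.List.pyGet? lista 0).getD 0 = (PySem.List.pyGet? lista 1).getD 0 then (1:Int) else 0) + 1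
       else
        (if (PySem.List.pyGet? lista 0).getD 0 = (PySem.List.pyGet? lista 1).getD 0 then (1:Int) else 0)) := by
  have hsplit : PySem.List.pyRange 0 (lista.length : Int) 1 =
      PySem.List.pyRange 0 ((lista.length : Int) - 1) 1 ++ [(lista.length : Int) - 1] := by
    have h := PySem.List.pyRange_one_succ_right (a := 0) (b := (lista.length : Int) - 1) (by omega)
    rw [sub_add_cancel] at h
    exact h
  rw [hsplit, List.foldl_append]
  rw [PySem.List.pyRange_one_cons (by omega : (0:Int) < (lista.length : Int) - 1)]
  simp only [List.foldl]
  have hfirst : igualdadeStep lista 0 0 =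
      (if (PySem.List.pyGet? lista 0).getD 0 = (PySem.List.pyGet? lista 1).getD 0 then (1:Int) else 0) := by
    unfold igualdadeStep; simp
  rw [hfirst, foldl_igualdadeStep_mid lista (0+1) ((lista.length : Int) - 1) (by omega) (by omega)]
  unfold igualdadeStep
  rw [if_neg (by omega), if_pos rfl]

-- negative indices agree with the length-based indices of A on lists of length ≥ 2
theorem neg_idx_eq (lista : List Int) (h : 2 ≤ lista.length) :
    PySem.List.pyGet? lista (-1) = PySem.List.pyGet? lista ((lista.length : Int) - 1) ∧
    PySem.List.pyGet? lista (-2) = PySem.List.pyGet? lista ((lista.length : Int) - 2) := by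
  constructor
  · rw [PySem.List.pyGet?_neg_ofNat lista 1 (by omega) (by omega),
        PySem.List.pyGet?_of_nonneg lista (by omega : (0:Int) ≤ (lista.length : Int) - 1)]
    congr 1; omega
  · rw [PySem.List.pyGet?_neg_ofNat lista 2 (by omega) (by omega),
        PySem.List.pyGet?_of_nonneg lista (by omega : (0:Int) ≤ (lista.length : Int) - 2)]
    congr 1; omega

-- ===== VERDICT (by name: the statement is the Claim_ definition above) =====
theorem igualdade_spec : Claim_equal_igualdade := by
  intro lista _ hpre
  unfold Spec_igualdade igualdade igualdade_alt
  match lista with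
  | [] => rfl
  | [x] => exact absurd rfl hpre
  | a :: b :: l =>
    have h2 : 2 ≤ (a :: b :: l).length := by simp
    obtain ⟨h1, hm2⟩ := neg_idx_eq (a :: b :: l) h2
    rw [igualdade_cont (a :: b :: l) h2, h1, hm2]
    have hlen : (0:Int) < ((a :: b :: l).length : Int) := by exact_mod_cast Nat.succ_pos _
    simp only [decide_eq_true hlen, Bool.true_and]
    split_ifs <;> simp_all
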